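-- pv_equiv track=rewrite | github.com/mh-daoud/dsa-practise- | List/IsUnique.py | frequencyArray
-- ===== SOURCE A (Python) =====
-- def frequencyArray(lst):
--     eArray = []
--     vistied = -1
--     for element in lst:
--         eArray.append(0)
--
--     for i in range(0,len(lst)):
--         count = 1
--         for j in range(i + 1 ,len(lst)):
--             if lst[i] == lst[j] :
--                 count +=1
--                 eArray[j] = vistied
--         if eArray[i] != vistied :
--             eArray[i] = count
--
--     return eArray
-- ===== SOURCE B (Python) =====
-- def frequencyArray(lst):
--     counts = {}
--     for v in lst:
--         counts[v] = counts.get(v, 0) + 1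
--     result = []
--     seen = set()
--     for v in lst:
--         if v in seen:
--             result.append(-1)
--         else:
--             seen.add(v)
--             result.append(counts[v])
--     return result
-- ===== Notes on version B (the rewrite author's own statement) =====
-- stated objective: faster
-- what changed: Replaces the quadratic nested rescans with two linear passes: a dict counting occurrences of each value, then a single pass that emits the total count at a value's first occurrence (tracked by a seen-set) and -1 at later ones.
import Mathlib
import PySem

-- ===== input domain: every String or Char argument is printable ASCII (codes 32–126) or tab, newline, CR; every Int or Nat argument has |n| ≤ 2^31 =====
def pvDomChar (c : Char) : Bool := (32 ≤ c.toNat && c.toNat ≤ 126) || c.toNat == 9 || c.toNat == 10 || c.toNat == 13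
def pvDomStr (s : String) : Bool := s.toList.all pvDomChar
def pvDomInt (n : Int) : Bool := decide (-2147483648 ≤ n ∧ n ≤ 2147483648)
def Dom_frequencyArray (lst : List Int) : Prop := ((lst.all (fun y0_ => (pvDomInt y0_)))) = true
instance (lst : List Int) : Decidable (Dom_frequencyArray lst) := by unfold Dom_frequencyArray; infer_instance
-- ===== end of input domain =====

-- B replaces A's quadratic nested rescans with two linear passes (a counting dict, then a seen-set pass); equivalence proved on all inputs.


-- ===== PORT A =====
-- Python list assignment xs[j] = v; exact for 0 ≤ j < xs.length, the only way the ports use it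
-- (every index comes from range(...) over valid positions).
def pySetIdx (xs : List Int) (j : Int) (v : Int) : List Int := xs.set j.toNat v

-- inner loop 'for j in range(i+1, len(lst))' with state (count, eArray)
def innerA (lst : List Int) (i : Int) (eArr : List Int) : Int × List Int :=
  (PySem.List.pyRange (i + 1) (lst.length : Int)).foldl
    (fun st j =>
      if PySem.List.pyGet? lst i = PySem.List.pyGet? lst j then (st.1 + 1, pySetIdx st.2 j (-1))
      else st)
    (1, eArr)

-- body of the outer loop 'for i in range(0, len(lst))'
def outerA (lst : List Int) (eArr : List Int) (i : Int) : List Int :=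
  let s := innerA lst i eArr
  if PySem.List.pyGet? s.2 i ≠ some (-1) then pySetIdx s.2 i s.1 else s.2

def frequencyArray (lst : List Int) : List Int :=
  let eArray : List Int := lst.foldl (fun acc _ => acc ++ [(0 : Int)]) []
  (PySem.List.pyRange 0 (lst.length : Int)).foldl (outerA lst) eArray

-- ===== PORT B =====
def frequencyArray_alt (lst : List Int) : List Int :=
  let counts : PySem.Dict Int Int :=
    lst.foldl (fun d v => d.insert v (d.getD v 0 + 1)) PySem.Dict.empty
  -- counts[v]: exact as getD since v was inserted by the first loop
  let st := lst.foldl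
    (fun (st : List Int × PySem.Set Int) v =>
      if v ∈ st.2 then (st.1 ++ [(-1 : Int)], st.2)
      else (st.1 ++ [counts.getD v 0], PySem.Set.add st.2 v))
    ([], PySem.Set.empty)
  st.1

-- ===== PRECONDITION & SPEC =====
def Spec_frequencyArray (lst : List Int) (out : List Int) : Prop := out = frequencyArray_alt lst
instance (lst : List Int) (out : List Int) : Decidable (Spec_frequencyArray lst out) := by unfold Spec_frequencyArray; infer_instance

-- ===== CLAIM (what is proved, stated in full; the proofs are below) =====
def Claim_equal_frequencyArray : Prop := ∀ (lst : List Int), Dom_frequencyArray lst → Spec_frequencyArray lst (frequencyArray lst)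

-- ===== LEMMAS AND PROOFS =====

-- a map of getD over range is the list itself
lemma map_getD_range (arr : List Int) (n : Nat) (h : arr.length = n) :
    (List.range n).map (fun j => arr.getD j 0) = arr := by
  apply List.ext_getElem
  · simp [h]
  · intro i h1 h2
    simp_all [List.getD_eq_getElem?_getD, List.getElem?_eq_getElem h2]

-- inner loop: counts the later duplicates of lst[i] and marks them -1
lemma inner_fold (lst : List Int) (i : Nat) (hi : i < lst.length) :
    ∀ (fuel a : Nat), lst.length - a = fuel → i < a → ∀ (c : Int) (arr : List Int), arr.length = lst.length →
    ((PySem.List.pyRange (a : Int) (lst.length : Int)).foldl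
      (fun st j =>
        if PySem.List.pyGet? lst (i : Int) = PySem.List.pyGet? lst j then (st.1 + 1, pySetIdx st.2 j (-1))
        else st)
      (c, arr))
    = (c + ((lst.drop a).count (lst.getD i 0) : Int),
       (List.range lst.length).map (fun j =>
         if a ≤ j ∧ lst.getD j 0 = lst.getD i 0 then -1 else arr.getD j 0)) := by
  intro fuel
  induction fuel with
  | zero =>
    intro a ha _ c arr harr
    have hna : lst.length ≤ a := by omega
    rw [PySem.List.pyRange_one_eq_nil (by exact_mod_cast hna)]
    have hdrop : lst.drop a = [] := List.drop_eq_nil_of_le hna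
    simp only [List.foldl_nil, hdrop, List.count_nil, Nat.cast_zero, add_zero]
    refine Prod.ext rfl ?_
    rw [List.map_congr_left (fun j hj => ?_), map_getD_range arr lst.length harr]
    have hjn : j < lst.length := List.mem_range.mp hj
    simp only [if_neg (by omega : ¬ (a ≤ j ∧ lst.getD j 0 = lst.getD i 0))]
  | succ fuel ih =>
    intro a ha hia c arr harr
    have han : a < lst.length := by omega
    rw [PySem.List.pyRange_one_cons (by exact_mod_cast han), List.foldl_cons]
    have hga : PySem.List.pyGet? lst (a : Int) = some (lst.getD a 0) := by
      rw [PySem.List.pyGet?_natCast, List.getElem?_eq_getElem han, List.getD_eq_getElem lst 0 han]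
    have hgi : PySem.List.pyGet? lst (i : Int) = some (lst.getD i 0) := by
      rw [PySem.List.pyGet?_natCast, List.getElem?_eq_getElem hi, List.getD_eq_getElem lst 0 hi]
    have hdrop : lst.drop a = lst.getD a 0 :: lst.drop (a + 1) := by
      rw [List.getD_eq_getElem lst 0 han]; exact List.drop_eq_getElem_cons han
    have hcast : ((a : Int) + 1) = ((a + 1 : Nat) : Int) := by push_cast; ring
    by_cases hC : lst.getD a 0 = lst.getD i 0
    · rw [if_pos (by rw [hga, hgi, hC])]
      have hset : pySetIdx arr (a : Int) (-1) = arr.set a (-1) := by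
        simp [pySetIdx]
      rw [hset, hcast, ih (a + 1) (by omega) (by omega) (c + 1) (arr.set a (-1)) (by simpa using harr)]
      refine Prod.ext ?_ ?_
      · show c + 1 + _ = c + _
        rw [hdrop, List.count_cons, if_pos (by exact beq_iff_eq.mpr hC)]
        push_cast; ring
      · apply List.map_congr_left
        intro j hj
        have hjn : j < lst.length := List.mem_range.mp hj
        by_cases hja : j = a
        · subst hja
          rw [if_neg (by omega : ¬ (j + 1 ≤ j ∧ lst.getD j 0 = lst.getD i 0)),
              if_pos (⟨le_refl j, hC⟩ : j ≤ j ∧ lst.getD j 0 = lst.getD i 0)]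
          rw [List.getD_eq_getElem?_getD, List.getElem?_set_self (by omega)]
          rfl
        · have hset2 : (arr.set a (-1)).getD j 0 = arr.getD j 0 := by
            rw [List.getD_eq_getElem?_getD, List.getD_eq_getElem?_getD,
                List.getElem?_set_ne (by omega)]
          rw [hset2]
          have hiff : (a + 1 ≤ j) ↔ (a ≤ j) := by omega
          simp only [hiff]
    · rw [if_neg (by rw [hga, hgi]; intro h; exact hC (Option.some.inj h).symm)]
      rw [hcast, ih (a + 1) (by omega) (by omega) c arr harr]
      refine Prod.ext ?_ ?_
      · show c + _ = c + _
        rw [hdrop, List.count_cons, if_neg (by simpa using hC)]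
        push_cast; ring
      · apply List.map_congr_left
        intro j hj
        have hjn : j < lst.length := List.mem_range.mp hj
        by_cases hja : j = a
        · subst hja
          rw [if_neg (by omega : ¬ (j + 1 ≤ j ∧ lst.getD j 0 = lst.getD i 0)),
              if_neg (by intro h; exact hC h.2)]
        · have hiff : (a + 1 ≤ j) ↔ (a ≤ j) := by omega
          simp only [hiff]

-- outer loop invariant
lemma outer_fold (lst : List Int) : ∀ (k : Nat), k ≤ lst.length →
    (PySem.List.pyRange 0 (k : Int)).foldl (outerA lst) (lst.map (fun _ => (0 : Int)))
    = (List.range lst.length).map (fun j =>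
        if j < k then (if lst.getD j 0 ∈ lst.take j then -1 else (((lst.drop j).count (lst.getD j 0) : Nat) : Int))
        else (if lst.getD j 0 ∈ lst.take k then -1 else 0)) := by
  intro k
  induction k with
  | zero =>
    intro _
    rw [show ((0 : Nat) : Int) = 0 from rfl, PySem.List.pyRange_one_eq_nil (le_refl 0),
        List.foldl_nil]
    apply List.ext_getElem
    · simp
    · intro j h1 h2
      simp
  | succ k ih =>
    intro hk1
    have hkn : k < lst.length := by omega
    have hcast : ((k + 1 : Nat) : Int) = (k : Int) + 1 := by push_cast; ring
    rw [hcast, PySem.List.pyRange_one_succ_right (by exact_mod_cast Nat.zero_le k),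
        List.foldl_append, List.foldl_cons, List.foldl_nil, ih (by omega)]
    unfold outerA innerA
    rw [show ((k : Int) + 1) = ((k + 1 : Nat) : Int) from by push_cast; ring,
        inner_fold lst k hkn (lst.length - (k + 1)) (k + 1) rfl (by omega) 1 _ (by simp)]
    have htake : lst.take (k + 1) = lst.take k ++ [lst.getD k 0] := by
      rw [List.take_add_one, List.getElem?_eq_getElem hkn, List.getD_eq_getElem lst 0 hkn]
      rfl
    have hcnt : (lst.drop k).count (lst.getD k 0) = (lst.drop (k + 1)).count (lst.getD k 0) + 1 := by
      rw [List.getD_eq_getElem lst 0 hkn, List.drop_eq_getElem_cons hkn, List.count_cons]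
      simp
    have hr2k : PySem.List.pyGet? ((List.range lst.length).map (fun j =>
        if k + 1 ≤ j ∧ lst.getD j 0 = lst.getD k 0 then -1
        else ((List.range lst.length).map (fun j =>
          if j < k then (if lst.getD j 0 ∈ lst.take j then -1 else (((lst.drop j).count (lst.getD j 0) : Nat) : Int))
          else (if lst.getD j 0 ∈ lst.take k then -1 else 0))).getD j 0)) (k : Int)
        = some (if lst.getD k 0 ∈ lst.take k then -1 else 0) := by
      rw [PySem.List.pyGet?_natCast, List.getElem?_map, List.getElem?_range hkn]
      simp only [Option.map_some, Option.some.injEq, and_true]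
      rw [if_neg (by omega : ¬ k + 1 ≤ k),
          PySem.List.getD_map_range _ _ _ _ hkn, if_neg (by omega : ¬ k < k)]
    by_cases hmem : lst.getD k 0 ∈ lst.take k
    · rw [if_neg (by rw [hr2k, if_pos hmem]; simp)]
      apply List.ext_getElem
      · simp
      · intro j h1 h2
        have hjn : j < lst.length := by simpa using h1
        simp only [List.getElem_map, List.getElem_range]
        rw [PySem.List.getD_map_range _ _ _ _ hjn]
        rcases lt_trichotomy j k with hj | hj | hj
        · simp [show ¬ k + 1 ≤ j by omega, hj, show j < k + 1 by omega]
        · subst hj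
          simp only [show ¬ j + 1 ≤ j by omega, false_and, if_false, show ¬ j < j by omega,
            show j < j + 1 by omega, if_true]
          rw [if_pos hmem, if_pos hmem]
        · simp only [show ¬ j < k by omega, if_false, show ¬ j < k + 1 by omega,
            show k + 1 ≤ j by omega, true_and, htake, List.mem_append, List.mem_singleton]
          by_cases he : lst[j]?.getD 0 = lst[k]?.getD 0 <;>
            by_cases hm : lst[j]?.getD 0 ∈ lst.take k <;> simp [he, hm]
    · rw [if_pos (by rw [hr2k, if_neg hmem]; simp)]
      simp only [pySetIdx, Int.toNat_natCast]
      apply List.ext_getElem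
      · simp
      · intro j h1 h2
        have hjn : j < lst.length := by simpa using h1
        rw [List.getElem_set]
        simp only [List.getElem_map, List.getElem_range]
        by_cases hj : k = j
        · subst hj
          rw [if_pos rfl, if_pos (by omega : k < k + 1), if_neg hmem]
          rw [hcnt]
          push_cast
          ring
        · rw [if_neg hj, PySem.List.getD_map_range _ _ _ _ hjn]
          rcases lt_trichotomy j k with hlt | heq | hgt
          · simp [show ¬ k + 1 ≤ j by omega, hlt, show j < k + 1 by omega]
          · exact absurd heq.symm hj
          · simp only [show ¬ j < k by omega, if_false, show ¬ j < k + 1 by omega,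
              show k + 1 ≤ j by omega, true_and, htake, List.mem_append, List.mem_singleton]
            by_cases he : lst[j]?.getD 0 = lst[k]?.getD 0 <;>
              by_cases hm : lst[j]?.getD 0 ∈ lst.take k <;> simp [he, hm]

-- recursive model of B's second loop
def mark (lst : List Int) : List Int → List Int → List Int
  | _, [] => []
  | p, v :: t => (if v ∈ p then (-1 : Int) else ((lst.count v : Nat) : Int)) :: mark lst (p ++ [v]) t

lemma b_loop (lst : List Int) :
    ∀ (l : List Int) (p : List Int) (acc : List Int),
    (l.foldl
      (fun (st : List Int × PySem.Set Int) v =>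
        if v ∈ st.2 then (st.1 ++ [(-1 : Int)], st.2)
        else (st.1 ++ [(PySem.Dict.counter lst).getD v 0], PySem.Set.add st.2 v))
      (acc, PySem.Set.ofList p)).1
    = acc ++ mark lst p l := by
  intro l
  induction l with
  | nil => intro p acc; simp [mark]
  | cons v t ih =>
    intro p acc
    by_cases hv : v ∈ p
    · have hs : PySem.Set.ofList (p ++ [v]) = PySem.Set.ofList p := by
        rw [PySem.Set.ofList_append_singleton, PySem.Set.add_of_mem (by simp [PySem.Set.mem_ofList, hv])]
      simp only [List.foldl_cons, if_pos (by simp [PySem.Set.mem_ofList, hv] :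
        v ∈ PySem.Set.ofList p)]
      rw [← hs, ih (p ++ [v]) (acc ++ [(-1 : Int)])]
      simp [mark, hv]
    · have hs : PySem.Set.add (PySem.Set.ofList p) v = PySem.Set.ofList (p ++ [v]) := by
        rw [PySem.Set.ofList_append_singleton]
      simp only [List.foldl_cons, if_neg (by simp [PySem.Set.mem_ofList, hv] :
        ¬ v ∈ PySem.Set.ofList p)]
      rw [hs, ih (p ++ [v])]
      simp [mark, hv, PySem.Dict.getD_counter]

lemma mark_length (lst : List Int) : ∀ (l p : List Int), (mark lst p l).length = l.length := by
  intro l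
  induction l with
  | nil => intro p; rfl
  | cons v t ih => intro p; simp [mark, ih]

lemma mark_getD (lst : List Int) :
    ∀ (l p : List Int) (j : Nat), j < l.length →
    (mark lst p l).getD j 0 = if l.getD j 0 ∈ p ++ l.take j then -1 else ((lst.count (l.getD j 0) : Nat) : Int) := by
  intro l
  induction l with
  | nil => intro p j hj; simp at hj
  | cons v t ih =>
    intro p j hj
    cases j with
    | zero => simp [mark]
    | succ j =>
      have := ih (p ++ [v]) j (by simpa using hj)
      simp only [mark, List.getD_cons_succ, List.take_succ_cons, this]
      simp [List.append_assoc]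

lemma alt_eq (lst : List Int) :
    frequencyArray_alt lst
    = (List.range lst.length).map (fun j =>
        if lst.getD j 0 ∈ lst.take j then -1 else ((lst.count (lst.getD j 0) : Nat) : Int)) := by
  have h1 : frequencyArray_alt lst = mark lst [] lst := by
    unfold frequencyArray_alt
    rw [PySem.Dict.foldl_insert_getD_add_one_eq_counter]
    have := b_loop lst lst [] []
    simpa using this
  rw [h1]
  apply List.ext_getElem
  · simp [mark_length]
  · intro j hl hr
    have hj : j < lst.length := by simpa [mark_length] using hl
    have := mark_getD lst lst [] j hj
    simp only [List.nil_append] at this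
    rw [← List.getD_eq_getElem _ 0 hl, ← List.getD_eq_getElem _ 0 hr, this]
    simp [List.getD_eq_getElem?_getD, List.getElem?_eq_getElem hj, List.getElem?_map,
      List.getElem?_range hj]

-- ===== VERDICT (by name: the statement is the Claim_ definition above) =====
theorem frequencyArray_spec : Claim_equal_frequencyArray := by
  intro lst _
  unfold Spec_frequencyArray frequencyArray
  rw [show (lst.foldl (fun acc _ => acc ++ [(0 : Int)]) []) = lst.map (fun _ => (0 : Int)) from by
        rw [PySem.List.foldl_append_singleton_eq_map]; simp,
      outer_fold lst lst.length (le_refl _), alt_eq]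
  apply List.map_congr_left
  intro j hj
  have hjn : j < lst.length := List.mem_range.mp hj
  rw [if_pos hjn]
  by_cases hm : lst.getD j 0 ∈ lst.take j
  · rw [if_pos hm, if_pos hm]
  · rw [if_neg hm, if_neg hm]
    set v := lst.getD j 0 with hv
    have hsplit : lst.count v = (lst.take j).count v + (lst.drop j).count v := by
      conv_lhs => rw [← List.take_append_drop j lst]
      rw [List.count_append]
    rw [hsplit, List.count_eq_zero.mpr hm, Nat.zero_add]
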